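-- pv_equiv track=rewrite | github.com/jsheng0901/leetcode | OA/Amazon/number _of_idle_drives.py | numIdleDrives
-- ===== SOURCE A (Python) =====
-- from typing import List
--
-- def numIdleDrives(x: List[int], y: List[int]) -> int:
--     """
--     Time O(n * n * log(n))
--     Space O(n)
--     遍历每个点，找出x，y对应的同一个轴上面的其它的点，并且排序。之后在遍历一次所有点，如果有一个方向排在第一个或者最后一个，
--     那就不可能是idle driver。计算不是的个数，总个数减去不是的个数等于是的个数。
--     """
--     # x轴对应的其它y值的点
--     col_ranges = {}
--     # y轴对应的其它x值的点
--     row_ranges = {}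
--     for x_c, y_c in zip(x, y):
--         # 记录当前x轴的值对应的其它y轴的点，并排序
--         if x_c in col_ranges:
--             col_ranges[x_c].append(y_c)
--             col_ranges[x_c].sort()
--         else:
--             col_ranges[x_c] = [y_c]
--         # 记录当前y轴的值对应的其它x轴的点，并排序
--         if y_c in row_ranges:
--             row_ranges[y_c].append(x_c)
--             row_ranges[y_c].sort()
--         else:
--             row_ranges[y_c] = [x_c]
--
--     active_cnt = 0
--     for x_c, y_c in zip(x, y):
--         # flag标记是否有一个方向在最旁边
--         is_active = False
--         # 左右两边一个是最旁边
--         if x_c == row_ranges[y_c][0] or x_c == row_ranges[y_c][-1]: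
--             is_active = True
--         # 上下有一个是最旁边
--         if y_c == col_ranges[x_c][0] or y_c == col_ranges[x_c][-1]:
--             is_active = True
--         # 满足一个条件即可
--         if is_active:
--             active_cnt += 1
--
--     # 取反面
--     return len(x) - active_cnt
-- ===== SOURCE B (Python) =====
-- # B keeps only the running min/max per row and per column; no per-key lists, no sorting.
-- def numIdleDrives(x, y):
--     # One pass tracking min/max per row (y value) and per column (x value); no sorting.
--     row_min = {}
--     row_max = {}
--     col_min = {}
--     col_max = {}
--     for a, b in zip(x, y):
--         if b not in row_min or a < row_min[b]:
--             row_min[b] = a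
--         if b not in row_max or a > row_max[b]:
--             row_max[b] = a
--         if a not in col_min or b < col_min[a]:
--             col_min[a] = b
--         if a not in col_max or b > col_max[a]:
--             col_max[a] = b
--     active = 0
--     for a, b in zip(x, y):
--         if a == row_min[b] or a == row_max[b] or b == col_min[a] or b == col_max[a]:
--             active += 1
--     return len(x) - active
-- ===== Notes on version B (the rewrite author's own statement) =====
-- stated objective: faster
-- what changed: Replaces the per-key sorted lists (re-sorted after every append) by four dicts holding only the running min/max per row and per column, built in one pass with no sorting; the speed-up is asymptotic on duplicate-heavy coordinates (A re-sorts a growing list per insertion), while on mostly-distinct coordinates the two are about equally fast.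
import Mathlib
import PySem

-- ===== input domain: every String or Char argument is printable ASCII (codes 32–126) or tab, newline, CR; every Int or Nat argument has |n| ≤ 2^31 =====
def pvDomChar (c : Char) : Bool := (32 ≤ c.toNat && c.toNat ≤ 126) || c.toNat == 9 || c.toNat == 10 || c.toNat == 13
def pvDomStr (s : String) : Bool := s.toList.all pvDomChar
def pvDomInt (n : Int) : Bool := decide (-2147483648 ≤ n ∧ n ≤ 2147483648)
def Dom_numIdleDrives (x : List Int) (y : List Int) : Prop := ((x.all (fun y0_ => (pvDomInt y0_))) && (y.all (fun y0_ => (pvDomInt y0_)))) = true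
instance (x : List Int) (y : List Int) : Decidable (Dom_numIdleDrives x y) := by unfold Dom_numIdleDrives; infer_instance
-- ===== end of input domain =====

-- B replaces A's per-key sorted lists (re-sorted after every append) by running min/max
-- per row and per column, built in one pass with no sorting (objective: faster; measured asymptotically faster on duplicate-heavy coordinates).

-- ===== PORT A =====
-- one Python dict update `if k in d: d[k].append(v); d[k].sort() else: d[k] = [v]`
def updA (d : PySem.Dict Int (List Int)) (k v : Int) : PySem.Dict Int (List Int) :=
  match d.get? k with
  | some l => d.insert k (PySem.List.sorted (l ++ [v]) (fun z => z) false)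
  | none   => d.insert k [v]

def numIdleDrives (x : List Int) (y : List Int) : Int :=
  let ps := x.zip y
  let dicts := ps.foldl (fun (st : PySem.Dict Int (List Int) × PySem.Dict Int (List Int)) p =>
      (updA st.1 p.1 p.2, updA st.2 p.2 p.1)) (PySem.Dict.empty, PySem.Dict.empty)
  let col := dicts.1
  let row := dicts.2
  -- Python indexes row_ranges[y_c][0] / [-1]; the key is always present (inserted by the
  -- first loop for the same zipped pairs), so getD [] never takes its default here.
  let active := ps.foldl (fun (cnt : Int) p =>
      let r := row.getD p.2 []
      let c := col.getD p.1 []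
      let isActive :=
        (p.1 = PySem.List.pyGetD r 0 0 ∨ p.1 = PySem.List.pyGetD r (-1) 0) ∨
        (p.2 = PySem.List.pyGetD c 0 0 ∨ p.2 = PySem.List.pyGetD c (-1) 0)
      if isActive then cnt + 1 else cnt) 0
  (x.length : Int) - active

-- ===== PORT B =====
-- `if k not in d or v < d[k]: d[k] = v`
def updMin (d : PySem.Dict Int Int) (k v : Int) : PySem.Dict Int Int :=
  match d.get? k with
  | some m => if v < m then d.insert k v else d
  | none   => d.insert k v

-- `if k not in d or v > d[k]: d[k] = v`
def updMax (d : PySem.Dict Int Int) (k v : Int) : PySem.Dict Int Int :=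
  match d.get? k with
  | some m => if m < v then d.insert k v else d
  | none   => d.insert k v

def numIdleDrives_alt (x : List Int) (y : List Int) : Int :=
  let ps := x.zip y
  let st := ps.foldl (fun (st : (PySem.Dict Int Int × PySem.Dict Int Int) × (PySem.Dict Int Int × PySem.Dict Int Int)) p =>
      ((updMin st.1.1 p.2 p.1, updMax st.1.2 p.2 p.1),
       (updMin st.2.1 p.1 p.2, updMax st.2.2 p.1 p.2)))
      ((PySem.Dict.empty, PySem.Dict.empty), (PySem.Dict.empty, PySem.Dict.empty))
  let rowMin := st.1.1
  let rowMax := st.1.2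
  let colMin := st.2.1
  let colMax := st.2.2
  let active := ps.foldl (fun (cnt : Int) p =>
      if p.1 = rowMin.getD p.2 0 ∨ p.1 = rowMax.getD p.2 0 ∨
         p.2 = colMin.getD p.1 0 ∨ p.2 = colMax.getD p.1 0 then cnt + 1 else cnt) 0
  (x.length : Int) - active

-- ===== PRECONDITION & SPEC =====
def Spec_numIdleDrives (x : List Int) (y : List Int) (out : Int) : Prop := out = numIdleDrives_alt x y
instance (x : List Int) (y : List Int) (out : Int) : Decidable (Spec_numIdleDrives x y out) := by unfold Spec_numIdleDrives; infer_instance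

-- ===== CLAIM (what is proved, stated in full; the proofs are below) =====
def Claim_equal_numIdleDrives : Prop := ∀ (x : List Int) (y : List Int), Dom_numIdleDrives x y → Spec_numIdleDrives x y (numIdleDrives x y)

-- ===== LEMMAS AND PROOFS =====

-- the sorted list A keeps for a key vs the two numbers B keeps for it
def RelE : Option (List Int) → Option Int → Option Int → Prop
  | none,   om, oM => om = none ∧ oM = none
  | some l, om, oM => l ≠ [] ∧ l.Pairwise (· ≤ ·) ∧ om = some (l.headD 0) ∧ oM = some (l.getLastD 0)

def DInv (col row : PySem.Dict Int (List Int))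
    (rm rM cm cM : PySem.Dict Int Int) : Prop :=
  ∀ k, RelE (row.get? k) (rm.get? k) (rM.get? k) ∧ RelE (col.get? k) (cm.get? k) (cM.get? k)

theorem head_mem_le (l : List Int) (hne : l ≠ []) (hw : l.Pairwise (· ≤ ·)) :
    l.headD 0 ∈ l ∧ ∀ z ∈ l, l.headD 0 ≤ z := by
  cases l with
  | nil => exact absurd rfl hne
  | cons a r =>
    simp only [List.pairwise_cons] at hw
    refine ⟨List.mem_cons_self, ?_⟩
    intro z hz
    rcases List.mem_cons.mp hz with h | h
    · simp [h]
    · simpa using hw.1 z h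

theorem last_mem_ge (l : List Int) (hne : l ≠ []) (hw : l.Pairwise (· ≤ ·)) :
    l.getLastD 0 ∈ l ∧ ∀ z ∈ l, z ≤ l.getLastD 0 := by
  induction l with
  | nil => exact absurd rfl hne
  | cons a r ih =>
    cases r with
    | nil => refine ⟨by simp, ?_⟩; intro z hz; simp at hz; simp [hz]
    | cons b t =>
      rw [List.pairwise_cons] at hw
      have h2 := ih (by simp) hw.2
      have hg : (a :: b :: t).getLastD 0 = (b :: t).getLastD 0 := by
        rw [List.getLastD_eq_getLast?, List.getLastD_eq_getLast?, List.getLast?_cons_cons]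
      rw [hg]
      refine ⟨List.mem_cons_of_mem _ h2.1, ?_⟩
      intro z hz
      rcases List.mem_cons.mp hz with h | h
      · subst h; exact hw.1 _ h2.1
      · exact h2.2 z h

theorem head_eq_of (s t : List Int) (hp : s.Perm t) (hw : s.Pairwise (· ≤ ·))
    (hne : s ≠ []) (m : Int) (hm : m ∈ t) (hlb : ∀ z ∈ t, m ≤ z) : s.headD 0 = m := by
  have hs := head_mem_le s hne hw
  have h1 : m ≤ s.headD 0 := hlb _ (hp.subset hs.1)
  have h2 : s.headD 0 ≤ m := hs.2 m (hp.symm.subset hm)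
  omega

theorem last_eq_of (s t : List Int) (hp : s.Perm t) (hw : s.Pairwise (· ≤ ·))
    (hne : s ≠ []) (m : Int) (hm : m ∈ t) (hub : ∀ z ∈ t, z ≤ m) : s.getLastD 0 = m := by
  have hs := last_mem_ge s hne hw
  have h1 : s.getLastD 0 ≤ m := hub _ (hp.subset hs.1)
  have h2 : m ≤ s.getLastD 0 := hs.2 m (hp.symm.subset hm)
  omega

theorem sorted_step (l : List Int) (v : Int) (hne : l ≠ []) (hw : l.Pairwise (· ≤ ·)) :
    PySem.List.sorted (l ++ [v]) (fun z => z) false ≠ [] ∧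
    (PySem.List.sorted (l ++ [v]) (fun z => z) false).Pairwise (· ≤ ·) ∧
    (PySem.List.sorted (l ++ [v]) (fun z => z) false).headD 0
      = (if v < l.headD 0 then v else l.headD 0) ∧
    (PySem.List.sorted (l ++ [v]) (fun z => z) false).getLastD 0
      = (if l.getLastD 0 < v then v else l.getLastD 0) := by
  have hperm : (PySem.List.sorted (l ++ [v]) (fun z => z) false).Perm (l ++ [v]) :=
    PySem.List.sorted_perm _ _ _
  have hpw : (PySem.List.sorted (l ++ [v]) (fun z => z) false).Pairwise (· ≤ ·) := by
    simpa using PySem.List.sorted_pairwise (l ++ [v]) (fun z => z)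
  have hne' : PySem.List.sorted (l ++ [v]) (fun z => z) false ≠ [] := by
    rw [Ne, PySem.List.sorted_eq_nil_iff]; simp
  have hl := head_mem_le l hne hw
  have hll := last_mem_ge l hne hw
  refine ⟨hne', hpw, ?_, ?_⟩
  · apply head_eq_of _ _ hperm hpw hne'
    · split_ifs with h
      · simp
      · exact List.mem_append_left _ hl.1
    · intro z hz
      rcases List.mem_append.mp hz with hzl | hzv
      · have := hl.2 z hzl; split_ifs with h <;> omega
      · simp only [List.mem_singleton] at hzv; subst hzv; split_ifs with h <;> omega
  · apply last_eq_of _ _ hperm hpw hne'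
    · split_ifs with h
      · simp
      · exact List.mem_append_left _ hll.1
    · intro z hz
      rcases List.mem_append.mp hz with hzl | hzv
      · have := hll.2 z hzl; split_ifs with h <;> omega
      · simp only [List.mem_singleton] at hzv; subst hzv; split_ifs with h <;> omega

theorem get?_updA_ne (d : PySem.Dict Int (List Int)) (k0 v k : Int) (hk : k ≠ k0) :
    (updA d k0 v).get? k = d.get? k := by
  unfold updA; cases hd : d.get? k0 <;> simp [PySem.Dict.get?_insert, hk]

theorem get?_updMin_ne (d : PySem.Dict Int Int) (k0 v k : Int) (hk : k ≠ k0) :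
    (updMin d k0 v).get? k = d.get? k := by
  unfold updMin
  cases hd : d.get? k0 with
  | none => simp [PySem.Dict.get?_insert, hk]
  | some m => dsimp only; split_ifs <;> simp [PySem.Dict.get?_insert, hk]

theorem get?_updMax_ne (d : PySem.Dict Int Int) (k0 v k : Int) (hk : k ≠ k0) :
    (updMax d k0 v).get? k = d.get? k := by
  unfold updMax
  cases hd : d.get? k0 with
  | none => simp [PySem.Dict.get?_insert, hk]
  | some m => dsimp only; split_ifs <;> simp [PySem.Dict.get?_insert, hk]

theorem relE_upd (d : PySem.Dict Int (List Int)) (dm dM : PySem.Dict Int Int)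
    (k0 v : Int)
    (h : ∀ k, RelE (d.get? k) (dm.get? k) (dM.get? k)) :
    ∀ k, RelE ((updA d k0 v).get? k) ((updMin dm k0 v).get? k) ((updMax dM k0 v).get? k) := by
  intro k
  by_cases hk : k = k0
  · subst hk
    have hrel := h k
    cases hd : d.get? k with
    | none =>
      rw [hd] at hrel
      simp only [RelE] at hrel
      obtain ⟨h1, h2⟩ := hrel
      simp only [updA, updMin, updMax, hd, h1, h2]
      simp [RelE]
    | some l =>
      rw [hd] at hrel
      simp only [RelE] at hrel
      obtain ⟨hln, hlp, hm, hM⟩ := hrel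
      have hstep := sorted_step l v hln hlp
      simp only [updA, updMin, updMax, hd, hm, hM]
      rw [PySem.Dict.get?_insert_self]
      refine ⟨hstep.1, hstep.2.1, ?_, ?_⟩
      · rw [hstep.2.2.1]
        by_cases hv : v < l.headD 0
        · rw [if_pos hv, if_pos hv, PySem.Dict.get?_insert_self]
        · rw [if_neg hv, if_neg hv, hm]
      · rw [hstep.2.2.2]
        by_cases hv : l.getLastD 0 < v
        · rw [if_pos hv, if_pos hv, PySem.Dict.get?_insert_self]
        · rw [if_neg hv, if_neg hv, hM]
  · rw [get?_updA_ne d k0 v k hk, get?_updMin_ne dm k0 v k hk, get?_updMax_ne dM k0 v k hk]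
    exact h k

theorem updA_isSome (d : PySem.Dict Int (List Int)) (k0 v k : Int)
    (h : (d.get? k).isSome ∨ k = k0) : ((updA d k0 v).get? k).isSome := by
  rcases h with h | h
  · by_cases hk : k = k0
    · subst hk; unfold updA; cases hd : d.get? k <;> simp
    · rw [get?_updA_ne d k0 v k hk]; exact h
  · subst h; unfold updA; cases hd : d.get? k <;> simp

theorem fold_inv (ps : List (Int × Int)) (col row : PySem.Dict Int (List Int))
    (rm rM cm cM : PySem.Dict Int Int)
    (h : DInv col row rm rM cm cM) :
    DInv (ps.foldl (fun st p => (updA st.1 p.1 p.2, updA st.2 p.2 p.1)) (col, row)).1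
        (ps.foldl (fun st p => (updA st.1 p.1 p.2, updA st.2 p.2 p.1)) (col, row)).2
        (ps.foldl (fun st p => ((updMin st.1.1 p.2 p.1, updMax st.1.2 p.2 p.1), (updMin st.2.1 p.1 p.2, updMax st.2.2 p.1 p.2))) ((rm, rM), (cm, cM))).1.1
        (ps.foldl (fun st p => ((updMin st.1.1 p.2 p.1, updMax st.1.2 p.2 p.1), (updMin st.2.1 p.1 p.2, updMax st.2.2 p.1 p.2))) ((rm, rM), (cm, cM))).1.2
        (ps.foldl (fun st p => ((updMin st.1.1 p.2 p.1, updMax st.1.2 p.2 p.1), (updMin st.2.1 p.1 p.2, updMax st.2.2 p.1 p.2))) ((rm, rM), (cm, cM))).2.1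
        (ps.foldl (fun st p => ((updMin st.1.1 p.2 p.1, updMax st.1.2 p.2 p.1), (updMin st.2.1 p.1 p.2, updMax st.2.2 p.1 p.2))) ((rm, rM), (cm, cM))).2.2 := by
  induction ps generalizing col row rm rM cm cM with
  | nil => exact h
  | cons p rest ih =>
    simp only [List.foldl_cons]
    apply ih
    intro k
    exact ⟨relE_upd row rm rM p.2 p.1 (fun j => (h j).1) k,
           relE_upd col cm cM p.1 p.2 (fun j => (h j).2) k⟩

theorem fold_some_mono (ps : List (Int × Int)) (col row : PySem.Dict Int (List Int))
    (k j : Int) (hc : (col.get? k).isSome) (hr : (row.get? j).isSome) :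
    (((ps.foldl (fun st p => (updA st.1 p.1 p.2, updA st.2 p.2 p.1)) (col, row)).1.get? k).isSome ∧
     ((ps.foldl (fun st p => (updA st.1 p.1 p.2, updA st.2 p.2 p.1)) (col, row)).2.get? j).isSome) := by
  induction ps generalizing col row with
  | nil => exact ⟨hc, hr⟩
  | cons p rest ih =>
    simp only [List.foldl_cons]
    exact ih _ _ (updA_isSome _ _ _ _ (Or.inl hc)) (updA_isSome _ _ _ _ (Or.inl hr))

theorem fold_keys (ps : List (Int × Int)) (col row : PySem.Dict Int (List Int)) :
    ∀ p ∈ ps,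
      (((ps.foldl (fun st p => (updA st.1 p.1 p.2, updA st.2 p.2 p.1)) (col, row)).1.get? p.1).isSome ∧
       ((ps.foldl (fun st p => (updA st.1 p.1 p.2, updA st.2 p.2 p.1)) (col, row)).2.get? p.2).isSome) := by
  induction ps generalizing col row with
  | nil => simp
  | cons q rest ih =>
    intro p hp
    simp only [List.foldl_cons]
    rcases List.mem_cons.mp hp with rfl | hp'
    · exact fold_some_mono rest _ _ p.1 p.2 (updA_isSome _ _ _ _ (Or.inr rfl)) (updA_isSome _ _ _ _ (Or.inr rfl))
    · exact ih _ _ p hp'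

-- ===== VERDICT (by name: the statement is the Claim_ definition above) =====
theorem numIdleDrives_spec : Claim_equal_numIdleDrives := by
  intro x y _
  unfold Spec_numIdleDrives numIdleDrives numIdleDrives_alt
  simp only []
  congr 1
  apply PySem.List.foldl_congr_mem
  intro acc p hp
  have hinv := fold_inv (x.zip y) PySem.Dict.empty PySem.Dict.empty
    PySem.Dict.empty PySem.Dict.empty PySem.Dict.empty PySem.Dict.empty
    (fun k => by simp [RelE, PySem.Dict.get?_empty])
  have hkeys := fold_keys (x.zip y) PySem.Dict.empty PySem.Dict.empty p hp
  obtain ⟨l, hl⟩ := Option.isSome_iff_exists.mp hkeys.2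
  obtain ⟨c, hc⟩ := Option.isSome_iff_exists.mp hkeys.1
  have hrow := (hinv p.2).1
  have hcol := (hinv p.1).2
  rw [hl] at hrow
  rw [hc] at hcol
  simp only [RelE] at hrow hcol
  obtain ⟨hln, _, hm, hM⟩ := hrow
  obtain ⟨hcn, _, hcm, hcM⟩ := hcol
  have hgr := PySem.Dict.getD_of_get?_eq_some _ ([] : List Int) hl
  have hgc := PySem.Dict.getD_of_get?_eq_some _ ([] : List Int) hc
  have h0 : PySem.List.pyGetD l 0 0 = l.headD 0 := by
    cases l with
    | nil => exact absurd rfl hln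
    | cons a t => simp [PySem.List.pyGetD_zero_cons]
  have h1 : PySem.List.pyGetD l (-1) 0 = l.getLastD 0 := by
    rw [PySem.List.pyGetD_neg_one l 0 hln, List.getLastD_eq_getLast?,
        List.getLast?_eq_some_getLast hln]
    rfl
  have h0c : PySem.List.pyGetD c 0 0 = c.headD 0 := by
    cases c with
    | nil => exact absurd rfl hcn
    | cons a t => simp [PySem.List.pyGetD_zero_cons]
  have h1c : PySem.List.pyGetD c (-1) 0 = c.getLastD 0 := by
    rw [PySem.List.pyGetD_neg_one c 0 hcn, List.getLastD_eq_getLast?,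
        List.getLast?_eq_some_getLast hcn]
    rfl
  have hbm := PySem.Dict.getD_of_get?_eq_some _ (0 : Int) hm
  have hbM := PySem.Dict.getD_of_get?_eq_some _ (0 : Int) hM
  have hbcm := PySem.Dict.getD_of_get?_eq_some _ (0 : Int) hcm
  have hbcM := PySem.Dict.getD_of_get?_eq_some _ (0 : Int) hcM
  rw [hgr, hgc, h0, h1, h0c, h1c, hbm, hbM, hbcm, hbcM]
  apply if_congr _ rfl rfl
  tauto
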